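-- pv_equiv track=rewrite | github.com/rajlath/rkl_codes | code-signal/task_type.py | tasksTypes
-- ===== SOURCE A (Python) =====
-- def tasksTypes(deadlines, day):
--     deadlines = sorted(deadlines)
--     ans = [0,0,0]
--     for i in deadlines:
--         if i <= day: ans[0] += 1
--         elif i <= day + 7: ans[1] += 1
--         else:
--             ans[2] += 1
--     return ans
-- ===== SOURCE B (Python) =====
-- def tasksTypes(deadlines, day):
--     n = len(deadlines)
--     i = sum(1 for x in deadlines if x <= day)
--     j = sum(1 for x in deadlines if x <= day + 7)
--     return [i, j - i, n - j]
-- ===== Notes on version B (the rewrite author's own statement) =====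
-- stated objective: simpler
-- what changed: B drops the sort and the three-way elif accumulator: it counts deadlines <= day and <= day+7 and derives the three buckets by subtraction.
import Mathlib
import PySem

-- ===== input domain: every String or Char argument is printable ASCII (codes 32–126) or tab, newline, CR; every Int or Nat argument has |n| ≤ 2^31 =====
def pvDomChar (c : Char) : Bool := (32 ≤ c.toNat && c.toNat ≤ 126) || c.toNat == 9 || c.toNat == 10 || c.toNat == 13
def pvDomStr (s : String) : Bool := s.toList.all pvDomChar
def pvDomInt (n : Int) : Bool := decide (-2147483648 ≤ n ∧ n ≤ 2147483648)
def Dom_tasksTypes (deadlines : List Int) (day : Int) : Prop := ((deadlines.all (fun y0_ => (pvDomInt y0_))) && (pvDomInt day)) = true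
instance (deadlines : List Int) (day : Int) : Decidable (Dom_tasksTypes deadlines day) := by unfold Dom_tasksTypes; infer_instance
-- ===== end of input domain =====

-- B drops A's sort and three-way elif accumulation: it counts deadlines ≤ day and ≤ day+7 and derives the buckets by subtraction (simpler).

-- ===== PORT A =====
def tasksTypes (deadlines : List Int) (day : Int) : List Int :=
  let sortedD := PySem.List.sorted deadlines (fun x => x) false
  let ans :=
    sortedD.foldl
      (fun (ans : Int × Int × Int) i =>
        if i ≤ day then (ans.1 + 1, ans.2.1, ans.2.2)
        else if i ≤ day + 7 then (ans.1, ans.2.1 + 1, ans.2.2)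
        else (ans.1, ans.2.1, ans.2.2 + 1))
      ((0 : Int), (0 : Int), (0 : Int))
  [ans.1, ans.2.1, ans.2.2]

-- ===== PORT B =====
def tasksTypes_alt (deadlines : List Int) (day : Int) : List Int :=
  let n : Int := deadlines.length
  let i : Int := ((deadlines.filter (fun x => x ≤ day)).map (fun _ => (1 : Int))).sum
  let j : Int := ((deadlines.filter (fun x => x ≤ day + 7)).map (fun _ => (1 : Int))).sum
  [i, j - i, n - j]

-- ===== PRECONDITION & SPEC =====
def Spec_tasksTypes (deadlines : List Int) (day : Int) (out : List Int) : Prop := out = tasksTypes_alt deadlines day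
instance (deadlines : List Int) (day : Int) (out : List Int) : Decidable (Spec_tasksTypes deadlines day out) := by unfold Spec_tasksTypes; infer_instance

-- ===== CLAIM (what is proved, stated in full; the proofs are below) =====
def Claim_equal_tasksTypes : Prop := ∀ (deadlines : List Int) (day : Int), Dom_tasksTypes deadlines day → Spec_tasksTypes deadlines day (tasksTypes deadlines day)

-- ===== LEMMAS AND PROOFS =====

-- the count 'sum of 1 over a filter' equals countP, as an Int
theorem pvSumOneFilter (l : List Int) (p : Int → Bool) :
    ((l.filter p).map (fun _ => (1 : Int))).sum = ((l.countP p : Nat) : Int) := by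
  induction l with
  | nil => simp
  | cons a t ih =>
    by_cases h : p a = true <;>
      simp only [List.filter_cons, List.countP_cons, h, if_pos, if_neg, List.map_cons,
        List.sum_cons, ih, cond_true, cond_false] <;> push_cast <;> omega

-- A's fold computes the three countP values, over any list, from any start
theorem pvFoldCounts (day : Int) (l : List Int) (a b c : Int) :
    l.foldl
      (fun (ans : Int × Int × Int) i =>
        if i ≤ day then (ans.1 + 1, ans.2.1, ans.2.2)
        else if i ≤ day + 7 then (ans.1, ans.2.1 + 1, ans.2.2)
        else (ans.1, ans.2.1, ans.2.2 + 1))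
      (a, b, c)
    = (a + (l.countP (fun x => x ≤ day) : Nat),
       b + (l.countP (fun x => !(x ≤ day) && (x ≤ day + 7)) : Nat),
       c + (l.countP (fun x => !(x ≤ day) && !(x ≤ day + 7)) : Nat)) := by
  induction l generalizing a b c with
  | nil => simp
  | cons x t ih =>
    simp only [List.foldl_cons, List.countP_cons]
    by_cases h1 : x ≤ day
    · simp only [h1, if_pos, decide_true, Bool.not_true, Bool.false_and, ih,
        Prod.mk.injEq, decide_eq_true_eq]
      refine ⟨by push_cast; ring, by simp, by simp⟩
    · by_cases h2 : x ≤ day + 7 <;>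
        · simp only [h1, h2, if_pos, if_neg, decide_true, decide_false, Bool.not_false,
            Bool.true_and, ih, Prod.mk.injEq, decide_eq_true_eq, not_false_eq_true,
            Bool.not_true, Bool.and_self]
          refine ⟨by simp [h1], ?_, ?_⟩ <;> simp [h1, h2] <;> push_cast <;> ring

-- the middle bucket is the difference of the two prefix counts
theorem pvSplit (day : Int) (l : List Int) :
    l.countP (fun x => decide (x ≤ day))
      + l.countP (fun x => !decide (x ≤ day) && decide (x ≤ day + 7))
      = l.countP (fun x => decide (x ≤ day + 7)) := by
  induction l with
  | nil => rfl
  | cons a t ih =>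
    simp only [List.countP_cons]
    by_cases h1 : a ≤ day
    · have h2 : a ≤ day + 7 := by omega
      simp [h1, h2]; omega
    · by_cases h2 : a ≤ day + 7 <;> simp [h1, h2] <;> omega

-- the last bucket is length minus the second prefix count
theorem pvTot (day : Int) (l : List Int) :
    l.countP (fun x => decide (x ≤ day + 7))
      + l.countP (fun x => !decide (x ≤ day) && !decide (x ≤ day + 7))
      = l.length := by
  induction l with
  | nil => rfl
  | cons a t ih =>
    simp only [List.countP_cons, List.length_cons]
    by_cases h1 : a ≤ day
    · have h2 : a ≤ day + 7 := by omega
      simp [h1, h2]; omega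
    · by_cases h2 : a ≤ day + 7 <;> simp [h1, h2] <;> omega

-- ===== VERDICT (by name: the statement is the Claim_ definition above) =====
theorem tasksTypes_spec : Claim_equal_tasksTypes := by
  intro deadlines day _
  unfold Spec_tasksTypes tasksTypes tasksTypes_alt
  simp only [pvFoldCounts, pvSumOneFilter]
  have hperm : (PySem.List.sorted deadlines (fun x => x) false).Perm deadlines :=
    PySem.List.sorted_perm ..
  rw [hperm.countP_eq, hperm.countP_eq, hperm.countP_eq]
  have hsplit := pvSplit day deadlines
  have htot := pvTot day deadlines
  simp only [List.cons.injEq, and_true]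
  refine ⟨by omega, by omega, by omega⟩
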